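-- pv_equiv track=rewrite | github.com/naonaox/math.practice | bioinfoStronghold/lexv.py | vary_length_lexi
-- ===== SOURCE A (Python) =====
-- def vary_length_lexi(chars,n):
--     nums=range(1,len(chars)+1)
--     str=[0]*n
--     str_collections=[]
--     while str!=[len(chars)]*n:
--         nonzero_len=str.count(0)
--         if nonzero_len!=0:
--             str[-1*nonzero_len]=nums[0]
--         else:
--             if str[-1]!=nums[-1]:
--                 str[-1]+=1
--             else:
--                 for i in range(n-1,-1,-1):
--                     if str[i]!=nums[-1]:
--                         str[i]+=1
--                         for j in range(i+1,n):
--                             str[j]=0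
--                         break
--         str_collections.append(str.copy())
--     position_collection=[]
--     for item in str_collections:
--         new_item=[x-1 for x in item if x!=0]
--         new_str=''.join([chars[x] for x in new_item])
--         position_collection.append(new_str)
--     return position_collection
-- ===== SOURCE B (Python) =====
-- def vary_length_lexi(chars, n):
--     result = []
--     stack = [c for c in chars] if n > 0 else []
--     while stack:
--         s = stack.pop(0)
--         result.append(s)
--         if len(s) < n:
--             stack = [s + c for c in chars] + stack
--     return result
-- ===== Notes on version B (the rewrite author's own statement) =====
-- stated objective: simpler
-- what changed: Replaced A's iterative carry/odometer loop over a zero-padded digit list (count zeros, negative-index writes, carry scan, then a second decode pass turning digit lists into strings) by a worklist DFS over the prefix tree: pop a string, emit it, and prepend its one-letter extensions, producing the same preorder directly with no digit encoding and no second pass.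
import Mathlib
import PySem

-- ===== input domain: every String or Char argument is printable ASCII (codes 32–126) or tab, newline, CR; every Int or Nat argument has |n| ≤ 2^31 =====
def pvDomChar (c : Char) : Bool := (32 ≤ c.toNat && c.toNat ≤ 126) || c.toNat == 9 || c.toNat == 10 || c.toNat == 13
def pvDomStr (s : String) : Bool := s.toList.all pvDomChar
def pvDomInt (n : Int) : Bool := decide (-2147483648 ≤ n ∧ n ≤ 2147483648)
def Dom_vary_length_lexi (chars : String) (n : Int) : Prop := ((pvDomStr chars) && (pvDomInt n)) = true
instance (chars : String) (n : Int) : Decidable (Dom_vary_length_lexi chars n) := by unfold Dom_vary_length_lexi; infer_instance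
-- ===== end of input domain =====

-- B replaces A's iterative carry/odometer loop over a zero-padded digit list (plus a second
-- decode pass) by a recursive DFS over the prefix tree emitting the same preorder directly (objective: simpler).

-- ===== PORT A =====
-- inner carry loop: "for i in range(n-1,-1,-1): if str[i]!=nums[-1]: str[i]+=1; for j in range(i+1,n): str[j]=0; break"
def pvCarry (mI : Int) (N : Nat) (str : List Int) : Nat → List Int
  | 0 => str
  | i+1 =>
    let v := PySem.List.pyGetD str (i : Int) 0      -- str[i]; i < N = len(str), never raises
    if v ≠ mI then
      (PySem.List.pyRange ((i : Int)+1) (N : Int) 1).foldl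
        (fun s j => PySem.List.pySetD s j 0)        -- for j in range(i+1,n): str[j]=0
        (PySem.List.pySetD str (i : Int) (v+1))     -- str[i]+=1
    else pvCarry mI N str i

-- one iteration of the while-loop body (str -> updated str)
def pvBody (m N : Nat) (str : List Int) : List Int :=
  let nums := PySem.List.pyRange 1 ((m : Int)+1) 1                 -- nums = range(1, len(chars)+1)
  let z := str.count 0                                             -- nonzero_len = str.count(0)
  if z ≠ 0 then
    PySem.List.pySetD str (-(z : Int)) (PySem.List.pyGetD nums 0 0)   -- str[-1*nonzero_len] = nums[0] (in range whenever this line runs)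
  else if PySem.List.pyGetD str (-1) 0 ≠ PySem.List.pyGetD nums (-1) 0 then
    PySem.List.pySetD str (-1) (PySem.List.pyGetD str (-1) 0 + 1)  -- str[-1] += 1
  else
    pvCarry (PySem.List.pyGetD nums (-1) 0) N str N

-- the while loop, with a fuel bound that only makes the recursion total (never reached on admitted inputs)
def pvLoop (m N : Nat) : Nat → List Int → List (List Int) → List (List Int)
  | 0, _, acc => acc
  | fuel+1, str, acc =>
    if str = List.replicate N ((m : Nat) : Int) then acc           -- while str != [len(chars)]*n
    else
      let str' := pvBody m N str
      pvLoop m N fuel str' (acc ++ [str'])                         -- str_collections.append(str.copy())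

-- second pass: item -> ''.join([chars[x] for x in [x-1 for x in item if x != 0]])
def pvStrItem (chars : String) (item : List Int) : String :=
  let newItem := (item.filter (fun x => x ≠ 0)).map (fun x => x - 1)
  PySem.Str.join "" (newItem.map (fun x => String.singleton ((PySem.Str.pyGet? chars x).getD ' ')))
  -- chars[x]: every x produced by the loop is in [0, len(chars)), so pyGet? never returns none

def vary_length_lexi (chars : String) (n : Int) : List String :=
  let m := chars.toList.length
  let N := n.toNat                                                  -- str = [0]*n ([] for n ≤ 0)
  (pvLoop m N ((m+1)^N) (List.replicate N 0) []).map (pvStrItem chars)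

-- ===== PORT B =====
-- node weight for the worklist's termination measure: size of the full prefix subtree of depth k
def pvTW (m : Nat) : Nat → Nat
  | 0 => 1
  | k+1 => 1 + m * pvTW m k

theorem pvTW_pos (m k : Nat) : 0 < pvTW m k := by
  cases k <;> simp [pvTW]

-- while stack: s = stack.pop(0); result.append(s); if len(s) < n: stack = [s+c for c in chars] + stack
def pvStack (cs : List Char) (n : Int) : List (List Char) → List String → List String
  | [], result => result
  | s :: rest, result =>
    if (s.length : Int) < n then
      pvStack cs n ((cs.map (fun c => s ++ [c])) ++ rest) (result ++ [String.ofList s])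
    else
      pvStack cs n rest (result ++ [String.ofList s])
termination_by stack _ => (stack.map (fun s => pvTW cs.length (n - s.length).toNat)).sum
decreasing_by
  · have hk : (n - (s.length : Int)).toNat = ((n - s.length - 1).toNat) + 1 := by omega
    simp only [List.map_append, List.sum_append, List.map_cons, List.sum_cons, List.map_map]
    rw [hk]
    have hconst : ∀ x : {x // x ∈ cs},
        pvTW cs.length (n - (((s ++ [x.1]).length : Nat) : Int)).toNat
          = pvTW cs.length (n - (s.length:Int) - 1).toNat := by
      intro x
      congr 1
      simp only [List.length_append, List.length_cons, List.length_nil]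
      omega
    simp only [Function.comp_def]
    rw [List.map_congr_left (fun (x : {x // x ∈ cs}) _ => hconst x), List.map_const',
      List.sum_replicate, List.length_attach]
    simp only [smul_eq_mul, pvTW]
    have := pvTW_pos cs.length (n - (s.length:Int) - 1).toNat
    omega
  · have := pvTW_pos cs.length (n - (s.length:Int)).toNat
    simp only [List.map_cons, List.sum_cons]
    omega

def vary_length_lexi_alt (chars : String) (n : Int) : List String :=
  pvStack chars.toList n (if 0 < n then chars.toList.map (fun c => [c]) else []) []

-- ===== PRECONDITION & SPEC =====
def Spec_vary_length_lexi (chars : String) (n : Int) (out : List String) : Prop := out = vary_length_lexi_alt chars n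
instance (chars : String) (n : Int) (out : List String) : Decidable (Spec_vary_length_lexi chars n out) := by unfold Spec_vary_length_lexi; infer_instance

-- ===== CLAIM (what is proved, stated in full; the proofs are below) =====
def Claim_equal_vary_length_lexi : Prop := ∀ (chars : String) (n : Int), Dom_vary_length_lexi chars n → Spec_vary_length_lexi chars n (vary_length_lexi chars n)

-- ===== LEMMAS AND PROOFS =====

-- B's preorder emission, written as a recursion on the prefix (proof-side restatement of the DFS)
def pvRec (cs : List Char) (n : Int) (pre : List Char) : List String :=
  if h : (pre.length : Int) ≥ n then []
  else cs.flatMap (fun c => String.ofList (pre ++ [c]) :: pvRec cs n (pre ++ [c]))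
termination_by (n.toNat - pre.length)
decreasing_by simp only [List.length_append, List.length_cons, List.length_nil]; omega

theorem pv_stack_eq (cs : List Char) (n : Int) :
    ∀ (stack : List (List Char)) (result : List String),
    pvStack cs n stack result
      = result ++ stack.flatMap (fun s => String.ofList s :: pvRec cs n s) := by
  intro stack result
  induction stack, result using pvStack.induct cs n with
  | case1 result => simp [pvStack]
  | case2 s rest result h ih =>
    simp only [List.map_subtype, List.unattach_attach] at ih
    rw [pvStack, if_pos h, ih]
    have hrec : pvRec cs n s
        = (cs.map (fun c => s ++ [c])).flatMap (fun t => String.ofList t :: pvRec cs n t) := by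
      rw [pvRec, dif_neg (by omega)]
      rw [List.flatMap_map]
    simp [hrec]
  | case3 s rest result h ih =>
    rw [pvStack, if_neg h, ih]
    have hrec : pvRec cs n s = [] := by
      rw [pvRec, dif_pos (by omega)]
    simp [hrec]

theorem pv_alt_eq_rec (chars : String) (n : Int) :
    vary_length_lexi_alt chars n = pvRec chars.toList n [] := by
  unfold vary_length_lexi_alt
  by_cases hn : 0 < n
  · rw [if_pos hn, pv_stack_eq]
    rw [show pvRec chars.toList n [] = chars.toList.flatMap
        (fun c => String.ofList ([] ++ [c]) :: pvRec chars.toList n ([] ++ [c])) from by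
      rw [pvRec, dif_neg (by simp; omega)]]
    rw [List.nil_append, List.flatMap_map]
    simp [Function.comp_def]
  · rw [if_neg hn, pv_stack_eq]
    rw [pvRec, dif_pos (by simp; omega)]
    simp

-- word w (the nonzero digits) written as characters of chars
def pvChrs (cs : List Char) (w : List Int) : List Char := w.map (fun a => cs.getD (a-1).toNat ' ')

-- zero-padding of a word to length N (the concrete loop state it stands for)
def pvPad (N : Nat) (w : List Int) : List Int := w ++ List.replicate (N - w.length) 0

-- the output A's loop still emits after finishing the subtree of the current word
-- (argument is the REVERSED word): siblings of each ancestor's last letter, in order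
def pvUp (cs : List Char) (n : Int) : List Int → List String
  | [] => []
  | a :: r =>
    if a < (cs.length : Int) then
      String.ofList (pvChrs cs (r.reverse ++ [a+1])) ::
        (pvRec cs n (pvChrs cs (r.reverse ++ [a+1])) ++ pvUp cs n ((a+1) :: r))
    else pvUp cs n r
termination_by w => (w.length, (w.map (fun a => ((cs.length : Int) - a).toNat)).sum)
decreasing_by
  · apply Prod.Lex.right
    simp only [List.map_cons, List.sum_cons]
    have : ((cs.length : Int) - (a+1)).toNat < ((cs.length : Int) - a).toNat := by omega
    omega
  · apply Prod.Lex.left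
    simp

theorem pvLoop_acc (m N : Nat) : ∀ (fuel : Nat) (str : List Int) (acc : List (List Int)),
    pvLoop m N fuel str acc = acc ++ pvLoop m N fuel str [] := by
  intro fuel
  induction fuel with
  | zero => intro str acc; simp [pvLoop]
  | succ f ih =>
    intro str acc
    by_cases h : str = List.replicate N ((m : Nat) : Int)
    · simp [pvLoop, h]
    · simp only [pvLoop, if_neg h]
      rw [ih _ (acc ++ [pvBody m N str]), ih _ ([] ++ [pvBody m N str])]
      simp

theorem pv_count_pad (w : List Int) (z : Nat) (hw : ∀ a ∈ w, a ≠ 0) :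
    (w ++ List.replicate z (0:Int)).count 0 = z := by
  rw [List.count_append, List.count_replicate]
  have h0 : w.count 0 = 0 := by
    rw [List.count_eq_zero]
    intro h; exact hw 0 h rfl
  simp [h0]

theorem pv_pySetD_neg (xs : List Int) (k : Nat) (v : Int) (h1 : 0 < k) (h2 : k ≤ xs.length) :
    PySem.List.pySetD xs (-(k:Int)) v = xs.set (xs.length - k) v := by
  have hk0 : k ≠ 0 := by omega
  have h3 : (-(xs.length:Int) ≤ -(k:Int)) := by omega
  simp [PySem.List.pySetD, PySem.List.pySet?, PySem.List.pyIdx?, h3, hk0]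

theorem pv_set_boundary (u : List Int) (x v : Int) (t : List Int) :
    (u ++ x :: t).set u.length v = u ++ v :: t := by
  rw [List.set_append_right _ _ (le_refl _)]
  simp

-- zeroing the suffix [j, s.length) of s
theorem pv_zero_foldl : ∀ (k : Nat) (j : Nat) (s : List Int), j + k = s.length →
    (PySem.List.pyRange (j : Int) ((s.length : Nat) : Int) 1).foldl (fun s j => PySem.List.pySetD s j 0) s
      = s.take j ++ List.replicate k 0 := by
  intro k
  induction k with
  | zero =>
    intro j s h
    rw [PySem.List.pyRange_one_eq_nil (by omega)]
    simp
    omega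
  | succ k ih =>
    intro j s h
    rw [PySem.List.pyRange_one_cons (by omega : (j:Int) < (s.length : Int))]
    simp only [List.foldl_cons]
    have hset : PySem.List.pySetD s (j:Int) 0 = s.set j 0 := by simp
    rw [hset]
    have hj : j < s.length := by omega
    have hlen : (s.set j 0).length = s.length := by simp
    have := ih (j+1) (s.set j 0) (by omega)
    rw [← hlen] at *
    push_cast at this ⊢
    rw [this]
    rw [show s.set j 0 = s.take j ++ 0 :: s.drop (j+1) from by
      simp [List.set_eq_take_append_cons_drop, hj]]
    rw [List.take_append]
    simp [List.take_take, Nat.min_eq_left hj.le, List.replicate_succ]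

theorem pv_carry_skip (mI : Int) (N : Nat) (str : List Int) :
    ∀ (k i : Nat), (∀ l : Nat, i ≤ l → l < i + k → str.getD l 0 = mI) →
    pvCarry mI N str (i + k) = pvCarry mI N str i := by
  intro k
  induction k with
  | zero => intro i _; rfl
  | succ k ih =>
    intro i h
    have h1 : str.getD (i+k) 0 = mI := h (i+k) (by omega) (by omega)
    have : i + (k+1) = (i+k) + 1 := by omega
    rw [this]
    show pvCarry mI N str ((i+k)+1) = _
    rw [pvCarry]
    simp only [PySem.List.pyGetD_natCast]
    push_cast
    rw [List.getD_eq_getElem?_getD] at h1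
    rw [if_neg (by simp [h1])]
    exact ih i (fun l hl1 hl2 => h l hl1 (by omega))

theorem pv_carry_step (mI : Int) (N : Nat) (str : List Int) (i : Nat)
    (hi : i < str.length) (hN : str.length = N) (hne : str.getD i 0 ≠ mI) :
    pvCarry mI N str (i+1)
      = (str.set i (str.getD i 0 + 1)).take (i+1) ++ List.replicate (N - (i+1)) 0 := by
  rw [pvCarry]
  simp only [PySem.List.pyGetD_natCast]
  rw [if_pos (by simpa using hne)]
  have hlen : (str.set i (str.getD i 0 + 1)).length = N := by simp [hN]
  have := pv_zero_foldl (N - (i+1)) (i+1) (str.set i (str.getD i 0 + 1)) (by omega)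
  rw [hlen] at this
  push_cast at this ⊢
  simpa only [PySem.List.pySetD_natCast] using this

theorem pv_up_peel (cs : List Char) (n : Int) :
    ∀ (j : Nat) (t : List Int), pvUp cs n (List.replicate j ((cs.length : Nat) : Int) ++ t) = pvUp cs n t := by
  intro j
  induction j with
  | zero => intro t; simp
  | succ j ih =>
    intro t
    rw [List.replicate_succ, List.cons_append, pvUp]
    rw [if_neg (by omega)]
    exact ih t

-- sibling expansion: pvUp on (a :: r) lists the remaining siblings a+1..m then goes up
theorem pv_sib (cs : List Char) (n : Int) :
    ∀ (k : Nat) (a : Int) (r : List Int), 1 ≤ a → a.toNat + k = cs.length →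
    pvUp cs n (a :: r) =
      (cs.drop a.toNat).flatMap
        (fun c => String.ofList (pvChrs cs r.reverse ++ [c]) :: pvRec cs n (pvChrs cs r.reverse ++ [c]))
        ++ pvUp cs n r := by
  intro k
  induction k with
  | zero =>
    intro a r ha hk
    have haeq : a = (cs.length : Int) := by omega
    rw [pvUp, if_neg (by omega)]
    rw [show a.toNat = cs.length from by omega]
    simp
  | succ k ih =>
    intro a r ha hk
    have halt : a < (cs.length : Int) := by omega
    rw [pvUp, if_pos halt]
    rw [ih (a+1) r (by omega) (by omega)]
    have hidx : a.toNat < cs.length := by omega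
    rw [show cs.drop a.toNat = cs[a.toNat] :: cs.drop (a.toNat + 1) from (List.getElem_cons_drop hidx).symm]
    rw [List.flatMap_cons]
    have hchr : pvChrs cs (r.reverse ++ [a+1]) = pvChrs cs r.reverse ++ [cs[a.toNat]] := by
      unfold pvChrs
      rw [List.map_append]
      simp only [List.map_cons, List.map_nil]
      rw [show a + 1 - 1 = a from by ring, List.getD_eq_getElem cs ' ' hidx]
    rw [hchr]
    have hdrop : (a+1).toNat = a.toNat + 1 := by omega
    rw [hdrop]
    simp [List.append_assoc]

theorem pv_join_nil_flatten (L : List (List Char)) : List.intercalate [] L = L.flatten := by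
  induction L with
  | nil => rfl
  | cons x t ih =>
    cases t with
    | nil => simp [List.intercalate]
    | cons y u =>
      simp only [List.intercalate, List.intersperse] at *
      simp_all [List.flatten]

theorem pv_join_singletons (l : List Char) :
    PySem.Str.join "" (l.map String.singleton) = String.ofList l := by
  simp only [PySem.Str.join, String.toList_empty, List.map_map]
  congr 1
  rw [show PySem.Chars.join ([] : List Char) = List.intercalate [] from rfl, pv_join_nil_flatten]
  induction l with
  | nil => rfl
  | cons c t ih => simpa using ih

theorem pv_strItem (chars : String) (N : Nat) (w : List Int)
    (hw : ∀ a ∈ w, 1 ≤ a ∧ a ≤ (chars.toList.length : Int)) :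
    pvStrItem chars (pvPad N w) = String.ofList (pvChrs chars.toList w) := by
  unfold pvStrItem pvPad
  have hfil : ((w ++ List.replicate (N - w.length) (0:Int)).filter (fun x => x ≠ 0)) = w := by
    rw [List.filter_append]
    have h1 : w.filter (fun x => x ≠ 0) = w :=
      List.filter_eq_self.mpr (fun a ha => by
        have := (hw a ha).1; simp; omega)
    have h2 : (List.replicate (N - w.length) (0:Int)).filter (fun x => x ≠ 0) = [] := by
      simp
    rw [h1, h2, List.append_nil]
  rw [hfil]
  show PySem.Str.join "" ((w.map (fun x => x - 1)).map (fun x => String.singleton ((PySem.Str.pyGet? chars x).getD ' '))) = _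
  rw [List.map_map]
  have hmap : w.map ((fun x => String.singleton ((PySem.Str.pyGet? chars x).getD ' ')) ∘ (fun x => x - 1))
      = (pvChrs chars.toList w).map String.singleton := by
    unfold pvChrs
    rw [List.map_map]
    apply List.map_congr_left
    intro a ha
    have h1 : 1 ≤ a := (hw a ha).1
    have h2 : a ≤ (chars.toList.length : Int) := (hw a ha).2
    have hcast : a - 1 = (((a-1).toNat : Nat) : Int) := by omega
    have hidx : (a-1).toNat < chars.toList.length := by omega
    simp only [Function.comp]
    rw [hcast, PySem.Str.pyGet?_natCast]
    rw [List.getElem?_eq_getElem hidx]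
    have hidx2 : a.toNat - 1 < chars.toList.length := by omega
    simp [List.getElem?_eq_getElem hidx2]
  rw [hmap, pv_join_singletons]

theorem pv_rec_len (cs : List Char) (n : Int) (hn : 0 ≤ n) :
    ∀ (k : Nat) (p : List Char), n.toNat - p.length = k →
    (pvRec cs n p).length + 1 ≤ (cs.length + 1) ^ k := by
  intro k
  induction k with
  | zero =>
    intro p hk
    have h : (p.length : Int) ≥ n := by omega
    rw [pvRec, dif_pos h]
    simp
  | succ k ih =>
    intro p hk
    by_cases h : (p.length : Int) ≥ n
    · rw [pvRec, dif_pos h]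
      simp [Nat.one_le_pow]
    · rw [pvRec, dif_neg h]
      rw [List.length_flatMap]
      have hbound : ∀ x ∈ cs.map (fun c => (String.ofList (p ++ [c]) :: pvRec cs n (p ++ [c])).length),
          x ≤ (cs.length + 1) ^ k := by
        intro x hx
        obtain ⟨c, _, rfl⟩ := List.mem_map.mp hx
        have := ih (p ++ [c]) (by simp; omega)
        simpa using this
      have hsum := List.sum_le_card_nsmul _ _ hbound
      rw [List.length_map] at hsum
      have hpow : (cs.length + 1) ^ (k+1) = (cs.length + 1) ^ k + cs.length * (cs.length + 1) ^ k := by ring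
      have hone : 1 ≤ (cs.length + 1) ^ k := Nat.one_le_pow _ _ (by omega)
      simp only [smul_eq_mul] at hsum
      omega


theorem pv_pad_len (N : Nat) (w : List Int) (h : w.length ≤ N) : (pvPad N w).length = N := by
  simp [pvPad]; omega

theorem pv_loop_exit (m N : Nat) (fuel : Nat) (acc : List (List Int)) :
    pvLoop m N fuel (List.replicate N ((m : Nat) : Int)) acc = acc := by
  cases fuel <;> simp [pvLoop]

theorem pv_nums_head (m : Nat) (hm : 1 ≤ m) :
    PySem.List.pyGetD (PySem.List.pyRange 1 ((m:Int)+1) 1) 0 0 = 1 := by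
  rw [PySem.List.pyRange_one_cons (by omega)]
  exact PySem.List.pyGetD_zero_cons _ _ _

theorem pv_nums_last (m : Nat) (hm : 1 ≤ m) :
    PySem.List.pyGetD (PySem.List.pyRange 1 ((m:Int)+1) 1) (-1) 0 = (m : Int) := by
  rw [PySem.List.pyRange_one_succ_right (by omega : (1:Int) ≤ (m:Int))]
  exact PySem.List.pyGetD_neg_one_append_singleton _ _ _

theorem pv_decomp : ∀ (v : List Int) (mI : Int), (∀ x ∈ v, x ≤ mI) →
    v ≠ List.replicate v.length mI →
    ∃ j a r, a < mI ∧ a ∈ v ∧ v = List.replicate j mI ++ a :: r := by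
  intro v
  induction v with
  | nil => intro mI _ hne; simp at hne
  | cons x t ih =>
    intro mI hle hne
    by_cases hx : x = mI
    · subst hx
      have hne' : t ≠ List.replicate t.length x := by
        intro h; apply hne; simp [List.replicate_succ, ← h]
      obtain ⟨j, a, r, h1, h2, h3⟩ := ih x (fun y hy => hle y (by simp [hy])) hne'
      exact ⟨j+1, a, r, h1, by simp [h2], by simp [List.replicate_succ, h3]⟩
    · exact ⟨0, x, t, lt_of_le_of_ne (hle x (by simp)) hx, by simp, by simp⟩

theorem pv_body_descend (m N : Nat) (hm : 1 ≤ m) (w : List Int)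
    (hw : ∀ a ∈ w, (1:Int) ≤ a) (hlt : w.length < N) :
    pvBody m N (pvPad N w) = pvPad N (w ++ [1]) := by
  obtain ⟨k, hk⟩ : ∃ k, N - w.length = k + 1 := ⟨N - w.length - 1, by omega⟩
  unfold pvBody
  have hz : (pvPad N w).count 0 = N - w.length := by
    unfold pvPad
    exact pv_count_pad w _ (fun a ha => by have := hw a ha; omega)
  simp only [hz]
  rw [if_pos (by omega)]
  rw [pv_nums_head m hm]
  have hlen : (pvPad N w).length = N := pv_pad_len N w (by omega)
  rw [pv_pySetD_neg _ _ _ (by omega) (by omega)]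
  rw [hlen]
  have hidx : N - (N - w.length) = w.length := by omega
  rw [hidx]
  have hpad : pvPad N w = w ++ 0 :: List.replicate k 0 := by
    unfold pvPad
    rw [hk, List.replicate_succ]
  rw [hpad, pv_set_boundary]
  simp [pvPad, show N - (w.length + 1) = k from by omega]

theorem pv_getD_mid (u : List Int) (a : Int) (t : List Int) :
    (u ++ a :: t).getD u.length 0 = a := by
  rw [List.getD_eq_getElem?_getD, List.getElem?_append_right (le_refl _)]
  simp

theorem pv_body_carry (m N : Nat) (hm : 1 ≤ m) (u : List Int) (a : Int) (j : Nat)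
    (ha1 : 1 ≤ a) (ha2 : a < (m:Int)) (hu : ∀ x ∈ u, (1:Int) ≤ x)
    (hN : u.length + 1 + j = N) :
    pvBody m N (u ++ a :: List.replicate j ((m:Nat):Int)) = pvPad N (u ++ [a+1]) := by
  have hlen : (u ++ a :: List.replicate j ((m:Nat):Int)).length = N := by simp; omega
  have hz : (u ++ a :: List.replicate j ((m:Nat):Int)).count 0 = 0 := by
    rw [List.count_eq_zero]
    intro h
    rcases List.mem_append.mp h with h' | h'
    · have := hu 0 h'; omega
    · rcases List.mem_cons.mp h' with h'' | h''
      · omega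
      · have := List.eq_of_mem_replicate h''; omega
  unfold pvBody
  simp only [hz]
  rw [if_neg (by simp)]
  rw [pv_nums_last m hm]
  cases j with
  | zero =>
    have hget : PySem.List.pyGetD (u ++ a :: List.replicate 0 ((m:Nat):Int)) (-1) 0 = a := by
      simp only [List.replicate_zero]
      exact PySem.List.pyGetD_neg_one_append_singleton _ _ _
    rw [hget, if_pos (show a ≠ ((m:Nat):Int) from by omega)]
    rw [show (-1 : Int) = -((1:Nat):Int) from by norm_num]
    rw [pv_pySetD_neg _ _ _ (by omega) (by simp)]
    simp only [List.replicate_zero] at *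
    rw [show (u ++ [a]).length - 1 = u.length from by simp]
    rw [show (u ++ [a]) = u ++ a :: [] from rfl, pv_set_boundary]
    simp [pvPad, show N - (u.length + 1) = 0 from by omega]
  | succ k =>
    have hget : PySem.List.pyGetD (u ++ a :: List.replicate (k+1) ((m:Nat):Int)) (-1) 0 = ((m:Nat):Int) := by
      rw [show u ++ a :: List.replicate (k+1) ((m:Nat):Int)
          = (u ++ a :: List.replicate k ((m:Nat):Int)) ++ [((m:Nat):Int)] from by
        rw [List.replicate_succ']; simp]
      exact PySem.List.pyGetD_neg_one_append_singleton _ _ _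
    rw [hget, if_neg (by simp)]
    set w := u ++ a :: List.replicate (k+1) ((m:Nat):Int) with hw
    have hskip : pvCarry ((m:Nat):Int) N w N = pvCarry ((m:Nat):Int) N w (u.length + 1) := by
      rw [show N = (u.length + 1) + (k+1) from by omega]
      apply pv_carry_skip
      intro l hl1 hl2
      rw [List.getD_eq_getElem?_getD, hw, List.getElem?_append_right (by omega)]
      rw [show l - u.length = (l - u.length - 1) + 1 from by omega]
      rw [List.getElem?_cons_succ]
      have hlk : l - u.length - 1 < k + 1 := by omega
      simp [hlk]
    rw [hskip]
    have hgd : w.getD u.length 0 = a := pv_getD_mid u a _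
    have hi1 : u.length < w.length := by rw [hlen]; omega
    have hi3 : w.getD u.length 0 ≠ ((m:Nat):Int) := by rw [hgd]; omega
    rw [pv_carry_step _ _ _ _ hi1 hlen hi3]
    rw [hgd, hw, pv_set_boundary]
    rw [List.take_append]
    rw [List.take_of_length_le (by omega)]
    simp only [show u.length + 1 - u.length = 1 from by omega]
    rw [show ((a+1) :: List.replicate (k+1) ((m:Nat):Int)).take 1 = [a+1] from rfl]
    simp [pvPad, show N - (u.length + 1) = k + 1 from by omega]

theorem pv_flatMap_head {α β : Type} (cs : List α) (h : 0 < cs.length) (F : α → List β) :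
    cs.flatMap F = F cs[0] ++ (cs.drop 1).flatMap F := by
  conv_lhs => rw [show cs = cs[0] :: cs.drop 1 from by
    rw [List.getElem_cons_drop]; simp]
  rw [List.flatMap_cons]

theorem pv_loop_succ (m N f : Nat) (str : List Int) (acc : List (List Int))
    (h : str ≠ List.replicate N ((m:Nat):Int)) :
    pvLoop m N (f+1) str acc = pvLoop m N f (pvBody m N str) (acc ++ [pvBody m N str]) := by
  simp only [pvLoop]
  rw [if_neg h]

theorem pv_up_nil (cs : List Char) (n : Int) : pvUp cs n [] = [] := by
  rw [pvUp]

theorem pv_main (chars : String) (n : Int) (hn : 0 ≤ n) (hm : 1 ≤ chars.toList.length) :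
    ∀ (fuel : Nat) (w : List Int),
      (∀ a ∈ w, 1 ≤ a ∧ a ≤ (chars.toList.length : Int)) →
      w.length ≤ n.toNat →
      (pvRec chars.toList n (pvChrs chars.toList w)).length
        + (pvUp chars.toList n w.reverse).length ≤ fuel →
      (pvLoop chars.toList.length n.toNat fuel (pvPad n.toNat w) []).map (pvStrItem chars)
        = pvRec chars.toList n (pvChrs chars.toList w) ++ pvUp chars.toList n w.reverse := by
  intro fuel
  induction fuel with
  | zero =>
    intro w hw hlen hfuel
    have hB : pvRec chars.toList n (pvChrs chars.toList w) = [] :=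
      List.eq_nil_of_length_eq_zero (by omega)
    have hU : pvUp chars.toList n w.reverse = [] :=
      List.eq_nil_of_length_eq_zero (by omega)
    rw [hB, hU]
    rfl
  | succ f ih =>
    intro w hw hlen hfuel
    by_cases hexit : pvPad n.toNat w = List.replicate n.toNat ((chars.toList.length : Nat) : Int)
    · -- loop exits: w is the all-m word of full length
      have hcount : (pvPad n.toNat w).count 0 = n.toNat - w.length := by
        unfold pvPad
        exact pv_count_pad w _ (fun a ha => by have := (hw a ha).1; omega)
      have hcount2 : (List.replicate n.toNat ((chars.toList.length : Nat) : Int)).count 0 = 0 := by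
        rw [List.count_replicate]
        have hne : ((((chars.toList.length : Nat) : Int)) == (0:Int)) ≠ true := by
          simp only [ne_eq, beq_iff_eq]
          omega
        rw [if_neg hne]
      have hfull : w.length = n.toNat := by rw [hexit] at hcount; omega
      have hwr : w = List.replicate n.toNat ((chars.toList.length : Nat) : Int) := by
        rw [← hexit]; simp [pvPad, hfull]
      have hB : pvRec chars.toList n (pvChrs chars.toList w) = [] := by
        rw [pvRec, dif_pos (by simp only [pvChrs, List.length_map]; omega)]
      have hU : pvUp chars.toList n w.reverse = [] := by
        rw [hwr, List.reverse_replicate]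
        rw [show List.replicate n.toNat ((chars.toList.length : Nat) : Int)
            = List.replicate n.toNat ((chars.toList.length : Nat) : Int) ++ [] from by simp]
        rw [pv_up_peel, pv_up_nil]
      rw [hexit, pv_loop_exit, hB, hU]
      rfl
    · by_cases hcase : w.length < n.toNat
      · -- descend: next state is w ++ [1]
        have h0 : 0 < chars.toList.length := hm
        have hbody := pv_body_descend chars.toList.length n.toNat hm w
          (fun a ha => (hw a ha).1) hcase
        have hchr : pvChrs chars.toList (w ++ [1]) = pvChrs chars.toList w ++ [chars.toList[0]] := by
          unfold pvChrs
          rw [List.map_append]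
          simp [List.getElem?_eq_getElem h0]
        have hlt' : ¬ (((pvChrs chars.toList w).length : Int) ≥ n) := by
          simp only [pvChrs, List.length_map]
          omega
        have hEQ : pvRec chars.toList n (pvChrs chars.toList w) ++ pvUp chars.toList n w.reverse
            = String.ofList (pvChrs chars.toList (w ++ [1])) ::
              (pvRec chars.toList n (pvChrs chars.toList (w ++ [1]))
                ++ pvUp chars.toList n (w ++ [1]).reverse) := by
          rw [pvRec, dif_neg hlt']
          rw [pv_flatMap_head chars.toList h0]
          rw [show (w ++ [(1:Int)]).reverse = (1:Int) :: w.reverse from by simp]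
          have hk1 : (1:Int).toNat + (chars.toList.length - 1) = chars.toList.length := by omega
          rw [pv_sib chars.toList n (chars.toList.length - 1) 1 w.reverse (le_refl 1) hk1]
          simp [hchr, List.append_assoc]
        have hfuel' : (pvRec chars.toList n (pvChrs chars.toList (w ++ [1]))).length
            + (pvUp chars.toList n (w ++ [1]).reverse).length ≤ f := by
          have := congrArg List.length hEQ
          simp only [List.length_append, List.length_cons] at this
          omega
        rw [pv_loop_succ _ _ _ _ _ hexit, hbody, pvLoop_acc]
        simp only [List.nil_append]
        rw [List.map_append, List.map_cons, List.map_nil]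
        rw [pv_strItem chars _ _ (fun a ha => by
            rcases List.mem_append.mp ha with h | h
            · exact hw a h
            · rcases List.mem_singleton.mp h with rfl; constructor <;> omega)]
        rw [ih (w ++ [1])
          (fun a ha => by
            rcases List.mem_append.mp ha with h | h
            · exact hw a h
            · rcases List.mem_singleton.mp h with rfl; constructor <;> omega)
          (by simp; omega) hfuel']
        rw [hEQ]
        rfl
      · -- full length: carry to u ++ [a+1]
        have hfull : w.length = n.toNat := by omega
        have hpadw : pvPad n.toNat w = w := by simp [pvPad, hfull]
        have hner : w.reverse ≠ List.replicate w.reverse.length ((chars.toList.length : Nat) : Int) := by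
          intro h
          apply hexit
          rw [hpadw]
          have : w = (List.replicate w.reverse.length ((chars.toList.length : Nat) : Int)).reverse := by
            rw [← h]; simp
          rw [this]
          simp [hfull]
        obtain ⟨j, a, r, haltm, hamem, hrev⟩ :=
          pv_decomp w.reverse ((chars.toList.length : Nat) : Int)
            (fun x hx => (hw x (List.mem_reverse.mp hx)).2) hner
        have ha1 : 1 ≤ a := (hw a (List.mem_reverse.mp hamem)).1
        have hwdec : w = r.reverse ++ a :: List.replicate j ((chars.toList.length : Nat) : Int) := by
          have : w = w.reverse.reverse := by simp
          rw [this, hrev]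
          simp [List.reverse_replicate]
        have hNlen : r.reverse.length + 1 + j = n.toNat := by
          have h2 := congrArg List.length hwdec
          simp at h2
          simp only [List.length_reverse]
          omega
        have hbody := pv_body_carry chars.toList.length n.toNat hm r.reverse a j ha1 haltm
          (fun x hx => (hw x (by rw [hwdec]; exact List.mem_append.mpr (Or.inl hx))).1) hNlen
        have huent : ∀ x ∈ r.reverse ++ [a+1], 1 ≤ x ∧ x ≤ (chars.toList.length : Int) := by
          intro x hx
          rcases List.mem_append.mp hx with h | h
          · exact hw x (by rw [hwdec]; exact List.mem_append.mpr (Or.inl h))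
          · rcases List.mem_singleton.mp h with rfl
            constructor <;> omega
        have hEQ : pvRec chars.toList n (pvChrs chars.toList w) ++ pvUp chars.toList n w.reverse
            = String.ofList (pvChrs chars.toList (r.reverse ++ [a+1])) ::
              (pvRec chars.toList n (pvChrs chars.toList (r.reverse ++ [a+1]))
                ++ pvUp chars.toList n (r.reverse ++ [a+1]).reverse) := by
          rw [pvRec, dif_pos (by simp only [pvChrs, List.length_map]; omega)]
          rw [hrev, pv_up_peel]
          rw [pvUp, if_pos haltm]
          simp
        have hfuel' : (pvRec chars.toList n (pvChrs chars.toList (r.reverse ++ [a+1]))).length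
            + (pvUp chars.toList n (r.reverse ++ [a+1]).reverse).length ≤ f := by
          have := congrArg List.length hEQ
          simp only [List.length_append, List.length_cons] at this
          omega
        rw [pv_loop_succ _ _ _ _ _ hexit]
        rw [hpadw, hwdec, hbody, pvLoop_acc]
        simp only [List.nil_append]
        rw [List.map_append, List.map_cons, List.map_nil]
        rw [pv_strItem chars _ _ huent]
        rw [ih (r.reverse ++ [a+1]) huent
          (by simp only [List.length_append, List.length_cons, List.length_nil]; omega) hfuel']
        rw [← hwdec, hEQ]
        rfl

-- ===== VERDICT (by name: the statement is the Claim_ definition above) =====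
theorem vary_length_lexi_spec : Claim_equal_vary_length_lexi := by
  intro chars n _
  unfold Spec_vary_length_lexi vary_length_lexi
  rw [pv_alt_eq_rec]
  by_cases hm : 1 ≤ chars.toList.length
  · by_cases hn : 0 ≤ n
    · have hUp : pvUp chars.toList n (([] : List Int)).reverse = [] := by
        rw [List.reverse_nil, pv_up_nil]
      have hfuel : (pvRec chars.toList n (pvChrs chars.toList [])).length
          + (pvUp chars.toList n (([] : List Int)).reverse).length
          ≤ (chars.toList.length + 1) ^ n.toNat := by
        have hlenB := pv_rec_len chars.toList n hn n.toNat [] (by simp)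
        rw [hUp]
        simp only [List.length_nil, Nat.add_zero]
        simp only [pvChrs, List.map_nil] at *
        omega
      have hmain := pv_main chars n hn hm ((chars.toList.length + 1) ^ n.toNat) []
        (by intro a ha; simp at ha) (by simp) hfuel
      rw [show pvPad n.toNat ([] : List Int) = List.replicate n.toNat 0 from by
        simp [pvPad]] at hmain
      rw [hUp, List.append_nil] at hmain
      simpa only [pvChrs, List.map_nil] using hmain
    · have hN : n.toNat = 0 := by omega
      show List.map (pvStrItem chars)
        (pvLoop chars.toList.length n.toNat ((chars.toList.length + 1) ^ n.toNat)
          (List.replicate n.toNat 0) []) = pvRec chars.toList n []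
      rw [hN]
      rw [show List.replicate 0 (0:Int) = ([] : List Int) from rfl]
      rw [pow_zero]
      rw [show pvLoop chars.toList.length 0 1 [] [] = [] from by
        simp [pvLoop]]
      rw [pvRec, dif_pos (by simp; omega)]
      rfl
  · have hcs : chars.toList = [] := by
      rw [← List.length_eq_zero_iff]; omega
    show List.map (pvStrItem chars)
      (pvLoop chars.toList.length n.toNat ((chars.toList.length + 1) ^ n.toNat)
        (List.replicate n.toNat 0) []) = pvRec chars.toList n []
    rw [hcs]
    rw [show (([] : List Char)).length = 0 from rfl]
    rw [show pvLoop 0 n.toNat ((0+1)^n.toNat) (List.replicate n.toNat 0) [] = [] from by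
      have := pv_loop_exit 0 n.toNat ((0+1)^n.toNat) []
      simpa using this]
    rw [pvRec]
    split
    · rfl
    · simp
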